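-- pv_equiv track=rewrite | github.com/vortexonpg3d196-maker/Idle-battler | idle_battler_v0_01_clean.py | tournament_rank
-- ===== SOURCE A (Python) =====
-- def tournament_rank(pts):
--     tiers = [
--         ("Bronze", 0, "#B45309"),
--         ("Silver", 250, "#94A3B8"),
--         ("Gold", 600, "#EAB308"),
--         ("Platinum", 1100, "#22C55E"),
--         ("Diamond", 1700, "#0EA5E9"),
--         ("Champion", 2400, "#A855F7"),
--     ]
--     cur = tiers[0]
--     for t in tiers:
--         if pts >= t[1]:
--             cur = t
--     return cur
-- ===== SOURCE B (Python) =====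
-- import bisect
--
-- def tournament_rank(pts):
--     tiers = [
--         ("Bronze", 0, "#B45309"),
--         ("Silver", 250, "#94A3B8"),
--         ("Gold", 600, "#EAB308"),
--         ("Platinum", 1100, "#22C55E"),
--         ("Diamond", 1700, "#0EA5E9"),
--         ("Champion", 2400, "#A855F7"),
--     ]
--     thresholds = [t[1] for t in tiers]
--     idx = max(0, bisect.bisect_right(thresholds, pts) - 1)
--     return tiers[idx]
-- ===== Notes on version B (the rewrite author's own statement) =====
-- stated objective: idiomatic
-- what changed: Replaced the linear keep-last scan over all tiers with bisect.bisect_right binary search on the extracted threshold list, clamping the index so sub-zero points still fall back to the Bronze tier.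
import Mathlib
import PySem

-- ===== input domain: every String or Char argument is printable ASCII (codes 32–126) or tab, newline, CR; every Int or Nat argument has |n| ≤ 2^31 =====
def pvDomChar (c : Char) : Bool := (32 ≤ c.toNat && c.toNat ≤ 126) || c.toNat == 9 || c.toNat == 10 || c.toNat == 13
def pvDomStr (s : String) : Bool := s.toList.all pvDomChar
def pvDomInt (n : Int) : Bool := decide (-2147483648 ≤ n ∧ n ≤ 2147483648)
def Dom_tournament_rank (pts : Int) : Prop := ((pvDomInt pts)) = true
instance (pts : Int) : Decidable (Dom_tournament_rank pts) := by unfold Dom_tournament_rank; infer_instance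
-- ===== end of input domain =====

-- B replaces A's linear keep-last scan with a bisect_right binary search over the threshold list (idiomatic).

-- ===== PORT A =====
def pvTiers : List (String × Int × String) :=
  [("Bronze", 0, "#B45309"),
   ("Silver", 250, "#94A3B8"),
   ("Gold", 600, "#EAB308"),
   ("Platinum", 1100, "#22C55E"),
   ("Diamond", 1700, "#0EA5E9"),
   ("Champion", 2400, "#A855F7")]

def tournament_rank (pts : Int) : String × Int × String :=
  let tiers := pvTiers
  let cur := tiers.getD 0 ("", 0, "")
  let cur := tiers.foldl (fun cur t => if pts ≥ t.2.1 then t else cur) cur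
  cur

-- ===== PORT B =====
-- port of the stdlib call bisect.bisect_right(xs, x): the insertion point after
-- existing entries equal to x; on a sorted list this is the number of elements ≤ x.
def pvBisectRight (xs : List Int) (x : Int) : Nat :=
  xs.countP (fun t => decide (t ≤ x))

def tournament_rank_alt (pts : Int) : String × Int × String :=
  let tiers := pvTiers
  let thresholds := tiers.map (fun t => t.2.1)
  let idx : Int := max 0 ((pvBisectRight thresholds pts : Int) - 1)
  tiers.getD idx.toNat ("", 0, "")

-- ===== PRECONDITION & SPEC =====
def Spec_tournament_rank (pts : Int) (out : String × Int × String) : Prop := out = tournament_rank_alt pts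
instance (pts : Int) (out : String × Int × String) : Decidable (Spec_tournament_rank pts out) := by unfold Spec_tournament_rank; infer_instance

-- ===== CLAIM (what is proved, stated in full; the proofs are below) =====
def Claim_equal_tournament_rank : Prop := ∀ (pts : Int), Dom_tournament_rank pts → Spec_tournament_rank pts (tournament_rank pts)

-- ===== LEMMAS AND PROOFS =====

-- ===== VERDICT (by name: the statement is the Claim_ definition above) =====
theorem tournament_rank_spec : Claim_equal_tournament_rank := by
  intro pts _
  unfold Spec_tournament_rank tournament_rank tournament_rank_alt pvTiers pvBisectRight
  simp only [List.foldl, List.map, List.countP, List.countP.go, ge_iff_le]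
  by_cases h0 : (0:Int) ≤ pts <;> by_cases h1 : (250:Int) ≤ pts <;>
    by_cases h2 : (600:Int) ≤ pts <;> by_cases h3 : (1100:Int) ≤ pts <;>
    by_cases h4 : (1700:Int) ≤ pts <;> by_cases h5 : (2400:Int) ≤ pts <;>
    first
      | (exfalso; omega)
      | simp [h0, h1, h2, h3, h4, h5]
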